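-- pv_equiv track=rewrite | github.com/l33z3r/icon_controller | Icon_V_and_P_Series_Ableton_XT3/v1_core/daw_map.py | SMART7
-- ===== SOURCE A (Python) =====
-- def SMART7(s, width=7):
--     s = (s or '').strip()
--     if not s:
--         return ' ' * int(width)
--     if len(s) <= width:
--         return s[:int(width)]
--     for ch in (' ', 'i', 'o', 'u', 'e', 'a', '-', '_'):
--         while len(s) > width:
--             pos = s.rfind(ch, 1)
--             if pos <= 0:
--                 break
--             s = s[:pos] + s[pos+1:]
--         if len(s) <= width:
--             break
--     return s[:int(width)]
-- ===== SOURCE B (Python) =====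
-- def SMART7(s, width=7):
--     s = (s or '').strip()
--     if not s:
--         return ' ' * int(width)
--     if len(s) <= width:
--         return s[:int(width)]
--     head, tail = s[0], s[1:]
--     for ch in (' ', 'i', 'o', 'u', 'e', 'a', '-', '_'):
--         need = len(tail) + 1 - width
--         if need <= 0:
--             break
--         k = min(need, tail.count(ch))
--         if k > 0:
--             out = []
--             for c in reversed(tail):
--                 if k > 0 and c == ch:
--                     k -= 1
--                 else:
--                     out.append(c)
--             out.reverse()
--             tail = ''.join(out)
--     return (head + tail)[:int(width)]
-- ===== Notes on version B (the rewrite author's own statement) =====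
-- stated objective: faster
-- what changed: Instead of repeatedly calling rfind and rebuilding the string by slicing once per removed character, B computes per priority character how many removals are needed, and drops that many rightmost matches of it in a single reverse scan of the tail.
import Mathlib
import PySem

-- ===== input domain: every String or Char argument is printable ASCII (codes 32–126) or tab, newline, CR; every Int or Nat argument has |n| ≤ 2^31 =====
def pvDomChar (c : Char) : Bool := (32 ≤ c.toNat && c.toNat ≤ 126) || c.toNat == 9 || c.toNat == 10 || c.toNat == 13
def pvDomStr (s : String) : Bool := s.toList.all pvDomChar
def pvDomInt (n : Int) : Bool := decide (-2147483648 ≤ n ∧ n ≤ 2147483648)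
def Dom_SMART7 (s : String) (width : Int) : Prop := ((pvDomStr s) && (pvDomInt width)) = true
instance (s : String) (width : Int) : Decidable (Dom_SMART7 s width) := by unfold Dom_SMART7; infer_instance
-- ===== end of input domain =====

-- B replaces A's repeated rfind-and-slice removal loop (quadratic) by one counted reverse scan
-- per priority character (linear); proved to return the same string on every input.

-- ===== PORT A =====
-- the inner 'while' of A: remove the rightmost occurrence (at index ≥ 1) of ch while len(s) > width.
-- fuel = length of the string at the call site; each iteration shortens s by one, so it never runs out.
def aWhile (ch : Char) (width : Int) : List Char → Nat → List Char
  | cs, 0 => cs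
  | cs, fuel + 1 =>
    if width < (cs.length : Int) then
      let pos := PySem.Chars.rfindFrom cs [ch] 1 none
      if pos ≤ 0 then cs
      else aWhile ch width
        (PySem.List.slice cs none (some pos) ++ PySem.List.slice cs (some (pos + 1)) none) fuel
    else cs

-- the 'for ch in …' loop of A, with its early break when len(s) <= width
def aFor (width : Int) : List Char → List Char → List Char
  | [], cs => cs
  | ch :: rest, cs =>
    let cs' := aWhile ch width cs cs.length
    if (cs'.length : Int) ≤ width then cs' else aFor width rest cs'

def SMART7 (s : String) (width : Int) : String :=
  let cs := PySem.Chars.strip s.toList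
  if cs = [] then String.ofList (List.replicate width.toNat ' ')
  else if (cs.length : Int) ≤ width then String.ofList (PySem.List.slice cs none (some width))
  else String.ofList (PySem.List.slice (aFor width [' ', 'i', 'o', 'u', 'e', 'a', '-', '_'] cs)
                   none (some width))

-- ===== PORT B =====
-- Source B's inner reverse scan: walking the reversed tail, skip up to k occurrences of ch
def dropRev (ch : Char) : Nat → List Char → List Char
  | _, [] => []
  | k, c :: r => if k ≠ 0 ∧ c = ch then dropRev ch (k - 1) r else c :: dropRev ch k r

-- Source B's 'for ch in …' loop over the tail (head is kept aside and never touched)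
def bFor (width : Int) : List Char → List Char → List Char
  | [], t => t
  | ch :: rest, t =>
    let need : Int := (t.length : Int) + 1 - width
    if need ≤ 0 then t
    else
      let k : Int := min need (t.count ch : Int)
      let t' := if 0 < k then (dropRev ch k.toNat t.reverse).reverse else t
      bFor width rest t'

def SMART7_alt (s : String) (width : Int) : String :=
  let cs := PySem.Chars.strip s.toList
  if cs = [] then String.ofList (List.replicate width.toNat ' ')
  else if (cs.length : Int) ≤ width then String.ofList (PySem.List.slice cs none (some width))
  else
    match cs with
    | [] => ""  -- unreachable: cs ≠ [] in this branch
    | h :: t => String.ofList (PySem.List.slice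
        (h :: bFor width [' ', 'i', 'o', 'u', 'e', 'a', '-', '_'] t) none (some width))

-- ===== PRECONDITION & SPEC =====
def Spec_SMART7 (s : String) (width : Int) (out : String) : Prop := out = SMART7_alt s width
instance (s : String) (width : Int) (out : String) : Decidable (Spec_SMART7 s width out) := by unfold Spec_SMART7; infer_instance

-- ===== CLAIM (what is proved, stated in full; the proofs are below) =====
def Claim_equal_SMART7 : Prop := ∀ (s : String) (width : Int), Dom_SMART7 s width → Spec_SMART7 s width (SMART7 s width)

-- ===== LEMMAS AND PROOFS =====

theorem prefix_single (ch : Char) (xs : List Char) :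
    [ch].isPrefixOf xs = true ↔ ∃ r, xs = ch :: r := by
  cases xs with
  | nil => simp [List.isPrefixOf]
  | cons c r =>
    simp only [List.isPrefixOf, Bool.and_true, beq_iff_eq,
      List.cons.injEq]
    constructor
    · intro h; exact ⟨r, h.symm, rfl⟩
    · rintro ⟨r', h1, h2⟩; exact h1.symm

theorem go_notmem (ch : Char) (s : List Char) (hm : ch ∉ s) :
    ∀ i, PySem.Chars.rfind.go s [ch] i = -1 := by
  intro i
  induction i with
  | zero =>
    simp only [PySem.Chars.rfind.go]
    rw [if_neg]
    intro h
    obtain ⟨r, hr⟩ := (prefix_single ch s).mp h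
    exact hm (hr ▸ List.mem_cons_self)
  | succ j ih =>
    simp only [PySem.Chars.rfind.go] at ih ⊢
    rw [if_neg]
    · exact ih
    · intro h
      obtain ⟨r, hr⟩ := (prefix_single ch _).mp h
      exact hm (List.mem_of_mem_drop (hr ▸ List.mem_cons_self))

theorem go_last (ch : Char) (p q : List Char) (hq : ch ∉ q) :
    ∀ i, p.length ≤ i → PySem.Chars.rfind.go (p ++ ch :: q) [ch] i = p.length := by
  intro i
  induction i with
  | zero =>
    intro h
    have hp : p = [] := List.eq_nil_of_length_eq_zero (Nat.le_zero.mp h)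
    subst hp
    simp only [PySem.Chars.rfind.go, List.nil_append]
    rw [if_pos ((prefix_single ch _).mpr ⟨q, rfl⟩)]
    rfl
  | succ j ih =>
    intro h
    rcases Nat.lt_or_ge p.length (j+1) with hlt | hge
    · simp only [PySem.Chars.rfind.go]
      rw [if_neg]
      · exact ih (Nat.lt_succ_iff.mp hlt)
      · intro hpre
        obtain ⟨r, hr⟩ := (prefix_single ch _).mp hpre
        have hd : (p ++ ch :: q).drop (j+1) = (ch :: q).drop (j + 1 - p.length) := by
          have : j + 1 = p.length + (j + 1 - p.length) := by omega
          rw [this, List.drop_length_add_append]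
          congr 1
          omega
        have hq1 : ch ∈ (ch :: q).drop (j + 1 - p.length) := by
          rw [← hd, hr]; exact List.mem_cons_self
        have : j + 1 - p.length = (j - p.length) + 1 := by omega
        rw [this, List.drop_succ_cons] at hq1
        exact hq (List.mem_of_mem_drop hq1)
    · have hpl : p.length = j + 1 := by omega
      simp only [PySem.Chars.rfind.go]
      rw [if_pos, hpl]
      rw [← hpl, List.drop_left]
      exact (prefix_single ch _).mpr ⟨q, rfl⟩

theorem rfind_notmem (ch : Char) (t : List Char) (hm : ch ∉ t) :
    PySem.Chars.rfind t [ch] = -1 := go_notmem ch t hm t.length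

theorem rfind_last (ch : Char) (p q : List Char) (hq : ch ∉ q) :
    PySem.Chars.rfind (p ++ ch :: q) [ch] = p.length := by
  apply go_last ch p q hq
  simp

theorem rfindFrom_cons (ch h : Char) (t : List Char) :
    PySem.Chars.rfindFrom (h :: t) [ch] 1 none =
      if PySem.Chars.rfind t [ch] = -1 then -1 else 1 + PySem.Chars.rfind t [ch] := by
  simp only [PySem.Chars.rfindFrom]
  norm_num


theorem dropRev_zero (ch : Char) (l : List Char) : dropRev ch 0 l = l := by
  induction l with
  | nil => rfl
  | cons c r ih => simp [dropRev, ih]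

theorem dropRev_succ (ch : Char) (k : Nat) (u v : List Char) (hu : ch ∉ u) :
    dropRev ch (k + 1) (u ++ ch :: v) = dropRev ch k (u ++ v) := by
  induction u with
  | nil => simp [dropRev]
  | cons c u' ih =>
    have hc : ¬ (c = ch) := fun h => hu (h ▸ List.mem_cons_self)
    simp only [List.cons_append, dropRev]
    rw [if_neg (by tauto), if_neg (by tauto), ih (fun h => hu (List.mem_cons_of_mem _ h))]

-- the removal count of A's inner while on tail t: stop at width, or when no occurrence is left
def remCount (ch : Char) (width : Int) (t : List Char) : Nat :=
  min (((t.length : Int) + 1 - width).toNat) (t.count ch)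

theorem aWhile_eq (ch h : Char) (width : Int) :
    ∀ (fuel : Nat) (t : List Char), remCount ch width t ≤ fuel →
      aWhile ch width (h :: t) fuel = h :: (dropRev ch (remCount ch width t) t.reverse).reverse := by
  intro fuel
  induction fuel with
  | zero =>
    intro t hf
    have h0 : remCount ch width t = 0 := Nat.le_zero.mp hf
    rw [aWhile, h0, dropRev_zero, List.reverse_reverse]
  | succ f ih =>
    intro t hf
    rw [aWhile]
    by_cases hw : width < ((h :: t).length : Int)
    · rw [if_pos (by simpa using hw)]
      by_cases hm : ch ∈ t
      · -- t = p ++ ch :: q with ch ∉ q (last occurrence, via the first occurrence of the reverse)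
        obtain ⟨u, v, huv, hu⟩ := List.eq_append_cons_of_mem (List.mem_reverse.mpr hm)
        have ht : t = v.reverse ++ ch :: u.reverse := by
          have := congrArg List.reverse huv
          simpa using this
        set p := v.reverse with hp
        set q := u.reverse with hq
        have hqch : ch ∉ q := fun hc => hu (List.mem_reverse.mp hc)
        have hfind : PySem.Chars.rfind t [ch] = p.length := ht ▸ rfind_last ch p q hqch
        have hpos : PySem.Chars.rfindFrom (h :: t) [ch] 1 none = 1 + (p.length : Int) := by
          rw [rfindFrom_cons, hfind, if_neg (by omega)]
        rw [hpos, if_neg (by omega)]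
        have e1 : (1 : Int) + (p.length : Int) = ((p.length + 1 : Nat) : Int) := by push_cast; ring
        rw [e1]
        have e2 : ((p.length + 1 : Nat) : Int) + 1 = ((p.length + 2 : Nat) : Int) := by
          push_cast; ring
        rw [e2, PySem.List.slice_to_natCast, PySem.List.slice_from_natCast, ht]
        have htk : (h :: (p ++ ch :: q)).take (p.length + 1) = h :: p := by
          rw [List.take_succ_cons, List.take_left]
        have hdr : (h :: (p ++ ch :: q)).drop (p.length + 2) = q := by
          have : p.length + 2 = (p.length + 1) + 1 := by omega
          rw [this, List.drop_succ_cons,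
            show (p ++ ch :: q).drop (p.length + 1) = ((p ++ ch :: q).drop p.length).drop 1 by
              rw [List.drop_drop],
            List.drop_left, List.drop_succ_cons, List.drop_zero]
        rw [htk, hdr, List.cons_append]
        -- counts and the decreasing removal budget
        have hcnt : t.count ch = (p ++ q).count ch + 1 := by
          rw [ht]; simp [List.count_append]; omega
        have hlen : t.length = (p ++ q).length + 1 := by rw [ht]; simp; omega
        have hneed : 0 < ((t.length : Int) + 1 - width).toNat := by
          simp only [List.length_cons] at hw; omega
        have hcpos : 0 < t.count ch := List.count_pos_iff.mpr hm
        have hrc : remCount ch width t = remCount ch width (p ++ q) + 1 := by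
          unfold remCount; rw [hcnt]; omega
        rw [ih (p ++ q) (by omega)]
        have hrc2 : remCount ch width (p ++ ch :: q) = remCount ch width (p ++ q) + 1 := by
          rw [ht] at hrc; exact hrc
        rw [hrc2, show (p ++ ch :: q).reverse = q.reverse ++ ch :: p.reverse by simp,
          show (p ++ q).reverse = q.reverse ++ p.reverse by simp,
          dropRev_succ ch _ _ _ (fun hc => hqch (List.mem_reverse.mp hc))]
      · have hc0 : t.count ch = 0 := List.count_eq_zero.mpr hm
        have hrc : remCount ch width t = 0 := by unfold remCount; omega
        rw [rfindFrom_cons, rfind_notmem ch t hm, if_pos rfl, if_pos (by norm_num),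
          hrc, dropRev_zero, List.reverse_reverse]
    · rw [if_neg hw]
      have hrc : remCount ch width t = 0 := by
        simp only [List.length_cons] at hw; unfold remCount; omega
      rw [hrc, dropRev_zero, List.reverse_reverse]

theorem bFor_stop (width : Int) :
    ∀ (chs t : List Char), (t.length : Int) + 1 - width ≤ 0 → bFor width chs t = t := by
  intro chs
  cases chs with
  | nil => intro t _; rfl
  | cons c rest => intro t hle; rw [bFor, if_pos hle]

theorem aFor_eq (h : Char) (width : Int) :
    ∀ (chs t : List Char), aFor width chs (h :: t) = h :: bFor width chs t := by
  intro chs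
  induction chs with
  | nil => intro t; rfl
  | cons ch rest ih =>
    intro t
    rw [aFor]
    simp only [bFor]
    have hW := aWhile_eq ch h width (h :: t).length t
      (by unfold remCount; have := List.count_le_length (l := t) (a := ch); simp; omega)
    rw [hW]
    by_cases hstop : (t.length : Int) + 1 - width ≤ 0
    · rw [if_pos hstop]
      have hrc : remCount ch width t = 0 := by unfold remCount; omega
      rw [hrc, dropRev_zero, List.reverse_reverse]
      rw [if_pos (by simp; omega)]
    · rw [if_neg hstop]
      -- B's k agrees with A's removal count
      have hk : (min ((t.length : Int) + 1 - width) ((t.count ch : Nat) : Int)).toNat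
          = remCount ch width t := by unfold remCount; omega
      set T' := (dropRev ch (remCount ch width t) t.reverse).reverse with hT
      have hB : (if 0 < min ((t.length : Int) + 1 - width) ((t.count ch : Nat) : Int) then
            (dropRev ch (min ((t.length : Int) + 1 - width) ((t.count ch : Nat) : Int)).toNat
              t.reverse).reverse else t) = T' := by
        by_cases hkpos : 0 < min ((t.length : Int) + 1 - width) ((t.count ch : Nat) : Int)
        · rw [if_pos hkpos, hk]
        · rw [if_neg hkpos]
          have : remCount ch width t = 0 := by unfold remCount; omega
          rw [hT, this, dropRev_zero, List.reverse_reverse]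
      rw [hB]
      by_cases hdone : ((h :: T').length : Int) ≤ width
      · rw [if_pos hdone]
        rw [bFor_stop width rest T' (by simp at hdone; omega)]
      · rw [if_neg hdone, ih T']

-- ===== VERDICT (by name: the statement is the Claim_ definition above) =====
theorem SMART7_spec : Claim_equal_SMART7 := by
  intro s width _
  unfold Spec_SMART7 SMART7 SMART7_alt
  cases hcs : PySem.Chars.strip s.toList with
  | nil => simp
  | cons h t =>
    simp only []
    have hne : ¬(h :: t = []) := by simp
    rw [if_neg hne]; rw [if_neg hne]
    by_cases hlen : (((h :: t).length : Nat) : Int) ≤ width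
    · rw [if_pos hlen]; rw [if_pos hlen]
    · rw [if_neg hlen]; rw [if_neg hlen]; rw [aFor_eq]
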